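-- pv_equiv track=rewrite | github.com/DarkExplorer31/Readen | read/utils.py | _replace_abbreviations
-- ===== SOURCE A (Python) =====
-- def _replace_abbreviations(text):
--     abbreviations = {
--         "dr.": "docteur",
--         "mr.": "monsieur",
--         "mrs.": "madame",
--         "&": "et",
--     }
--     for abbreviation, full_form in abbreviations.items():
--         text = text.replace(abbreviation, full_form)
--     return text
-- ===== SOURCE B (Python) =====
-- def _replace_abbreviations(text):
--     # One left-to-right scan consulting a table (longest key first),
--     # instead of four sequential full-text replace passes.
--     table = {"mrs.": "madame", "mr.": "monsieur", "dr.": "docteur", "&": "et"}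
--     out = []
--     i = 0
--     n = len(text)
--     while i < n:
--         for key, full in table.items():
--             if text.startswith(key, i):
--                 out.append(full)
--                 i += len(key)
--                 break
--         else:
--             out.append(text[i])
--             i += 1
--     return "".join(out)
-- ===== Notes on version B (the rewrite author's own statement) =====
-- stated objective: idiomatic
-- what changed: A makes four sequential full-text replace passes (one str.replace per abbreviation); B builds one table of the four abbreviations and does a single left-to-right scan, trying the keys (longest first) at each position and copying or substituting as it goes.
import Mathlib
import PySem

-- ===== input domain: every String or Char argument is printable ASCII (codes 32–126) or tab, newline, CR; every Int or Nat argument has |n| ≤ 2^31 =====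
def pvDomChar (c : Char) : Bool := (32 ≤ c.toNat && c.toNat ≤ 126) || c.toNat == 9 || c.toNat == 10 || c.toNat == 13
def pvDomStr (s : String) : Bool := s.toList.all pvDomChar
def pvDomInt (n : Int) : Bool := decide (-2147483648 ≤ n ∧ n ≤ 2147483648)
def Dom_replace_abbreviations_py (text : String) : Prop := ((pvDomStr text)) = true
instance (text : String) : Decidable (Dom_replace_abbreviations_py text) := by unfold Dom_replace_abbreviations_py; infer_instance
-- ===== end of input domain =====

-- B replaces A's four sequential full-text replace passes by a single left-to-right
-- scan that consults a table of the four abbreviations (longest key first): idiomatic single pass.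
-- ===== PORT A =====
def replace_abbreviations_py (text : String) : String :=
  PySem.Str.replace
    (PySem.Str.replace
      (PySem.Str.replace
        (PySem.Str.replace text "dr." "docteur")
        "mr." "monsieur")
      "mrs." "madame")
    "&" "et"

-- ===== PORT B =====
-- Hand port of Source B's scan loop: at each index, try the table keys in order
-- ("mrs.", "mr.", "dr.", "&"); on a match emit the full form and skip the key,
-- otherwise copy one character. Exact: str.startswith(key, i) = prefix test on the suffix.
def pvScanB : List Char → List Char
  | [] => []
  | c :: t =>
    if ['m','r','s','.'].isPrefixOf (c :: t) then "madame".toList ++ pvScanB (List.drop 3 t)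
    else if ['m','r','.'].isPrefixOf (c :: t) then "monsieur".toList ++ pvScanB (List.drop 2 t)
    else if ['d','r','.'].isPrefixOf (c :: t) then "docteur".toList ++ pvScanB (List.drop 2 t)
    else if c = '&' then "et".toList ++ pvScanB t
    else c :: pvScanB t
termination_by l => l.length
decreasing_by all_goals (simp [List.length_drop]; try omega)

def replace_abbreviations_py_alt (text : String) : String :=
  String.ofList (pvScanB text.toList)

-- ===== PRECONDITION & SPEC =====
def Spec_replace_abbreviations_py (text : String) (out : String) : Prop := out = replace_abbreviations_py_alt text
instance (text : String) (out : String) : Decidable (Spec_replace_abbreviations_py text out) := by unfold Spec_replace_abbreviations_py; infer_instance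

-- ===== CLAIM (what is proved, stated in full; the proofs are below) =====
def Claim_equal_replace_abbreviations_py : Prop := ∀ (text : String), Dom_replace_abbreviations_py text → Spec_replace_abbreviations_py text (replace_abbreviations_py text)

-- ===== LEMMAS AND PROOFS =====

-- A structural model of PySem.Chars.replace for a nonempty pattern.
def repF (old new : List Char) : List Char → List Char
  | [] => []
  | c :: t =>
    if old.isPrefixOf (c :: t) then new ++ repF old new (List.drop (old.length - 1) t)
    else c :: repF old new t
termination_by l => l.length
decreasing_by all_goals (simp [List.length_drop]; try omega)

theorem repF_go (old new : List Char) (h : old ≠ []) :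
    ∀ fuel l acc, l.length ≤ fuel →
      PySem.Chars.replace.go old new fuel l acc = acc.reverse ++ repF old new l := by
  intro fuel
  induction fuel with
  | zero =>
    intro l acc hl
    have : l = [] := List.eq_nil_of_length_eq_zero (Nat.le_zero.mp hl)
    subst this
    rw [PySem.Chars.replace.go]
    simp [repF]
  | succ n ih =>
    intro l acc hl
    cases l with
    | nil => rw [PySem.Chars.replace.go]; simp [repF]; omega
    | cons c t =>
      rw [PySem.Chars.replace.go]
      by_cases hp : old.isPrefixOf (c :: t)
      · rw [if_pos hp]
        have hlen : (List.drop old.length (c :: t)).length ≤ n := by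
          have h1 : 1 ≤ old.length := List.length_pos_iff.mpr h
          simp [List.length_drop] at *
          omega
        rw [ih _ _ hlen]
        have hdrop : List.drop old.length (c :: t) = List.drop (old.length - 1) t := by
          obtain ⟨oh, ot, rfl⟩ : ∃ oh ot, old = oh :: ot := by
            cases old with
            | nil => exact absurd rfl h
            | cons oh ot => exact ⟨oh, ot, rfl⟩
          simp
        rw [hdrop]
        simp [repF, hp]
      · rw [if_neg hp]
        have hlen : t.length ≤ n := by simp at hl; omega
        rw [ih _ _ hlen]
        simp [repF, hp]

theorem replace_eq_repF (s old new : List Char) (h : old ≠ []) :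
    PySem.Chars.replace s old new = repF old new s := by
  rw [PySem.Chars.replace]
  rw [if_neg (by simp [List.isEmpty_iff, h])]
  simpa using repF_go old new h s.length s [] le_rfl

-- Skip lemma: if the pattern matches nowhere inside the prefix a, replacement passes a through.
theorem repF_append_no_match (old new : List Char) :
    ∀ a b, (∀ i, i < a.length → old.isPrefixOf ((a ++ b).drop i) = false) →
      repF old new (a ++ b) = a ++ repF old new b := by
  intro a
  induction a with
  | nil => intro b _; simp
  | cons c a' ih =>
    intro b H
    have h0 : old.isPrefixOf (c :: (a' ++ b)) = false := by
      have := H 0 (by simp)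
      simpa using this
    show repF old new (c :: (a' ++ b)) = c :: (a' ++ repF old new b)
    rw [repF, if_neg (by simp [h0])]
    rw [ih b (fun i hi => by have := H (i + 1) (by simpa using Nat.succ_lt_succ hi); simpa using this)]

-- Head lemma: at a match, the pattern is consumed and the replacement is emitted.
theorem repF_append_match (oh : Char) (ot new b : List Char) :
    repF (oh :: ot) new ((oh :: ot) ++ b) = new ++ repF (oh :: ot) new b := by
  rw [show (oh :: ot) ++ b = oh :: (ot ++ b) from rfl, repF]
  rw [if_pos (List.isPrefixOf_iff_prefix.mpr ⟨b, by simp⟩)]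
  simp

-- Transfer lemma: a probe word containing no occurrence of the pattern's first
-- character is a prefix of the replaced string iff it is a prefix of the original,
-- provided the replacement starts with the same character as the pattern.
theorem prefix_transfer (oh : Char) (ot new' : List Char) :
    ∀ p : List Char, (∀ x ∈ p, x ≠ oh) →
      ∀ u, p.isPrefixOf (repF (oh :: ot) (oh :: new') u) = p.isPrefixOf u := by
  intro p
  induction p with
  | nil => intro _ u; simp [List.isPrefixOf]
  | cons x p' ih =>
    intro hp u
    have hx : x ≠ oh := hp x (by simp)
    cases u with
    | nil => simp [repF, List.isPrefixOf]
    | cons c t =>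
      by_cases hpre : (oh :: ot).isPrefixOf (c :: t)
      · have hc : c = oh := by
          have := List.isPrefixOf_iff_prefix.mp hpre
          obtain ⟨s, hs⟩ := this
          simpa using congrArg (List.head? ·) hs.symm
        have hxo : (x == oh) = false := by simpa using hx
        rw [repF, if_pos hpre]
        simp [List.isPrefixOf, hc, hxo]
      · rw [repF, if_neg hpre]
        simp [List.isPrefixOf, ih (fun x hx' => hp x (by simp [hx']))]

-- The four-pass pipeline, as repF compositions.
def pipe (l : List Char) : List Char :=
  repF ['&'] "et".toList
    (repF ['m','r','s','.'] "madame".toList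
      (repF ['m','r','.'] "monsieur".toList
        (repF ['d','r','.'] "docteur".toList l)))

theorem pipe_eq_scan : ∀ l : List Char, pipe l = pvScanB l := by
  intro l
  induction l using pvScanB.induct with
  | case1 => simp [pipe, repF, pvScanB]
  | case2 c t h1 ih =>
    obtain ⟨b, hb⟩ := List.isPrefixOf_iff_prefix.mp h1
    obtain ⟨rfl, rfl⟩ : c = 'm' ∧ t = 'r' :: 's' :: '.' :: b := by
      have := hb
      simp at this
      exact ⟨this.1.symm, this.2.symm⟩
    have e1 : repF ['d','r','.'] "docteur".toList (['m','r','s','.'] ++ b)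
        = ['m','r','s','.'] ++ repF ['d','r','.'] "docteur".toList b := by
      apply repF_append_no_match
      intro i hi; simp at hi; interval_cases i <;> simp [List.isPrefixOf]
    have e2 : ∀ X, repF ['m','r','.'] "monsieur".toList (['m','r','s','.'] ++ X)
        = ['m','r','s','.'] ++ repF ['m','r','.'] "monsieur".toList X := by
      intro X
      apply repF_append_no_match
      intro i hi; simp at hi; interval_cases i <;> simp [List.isPrefixOf]
    have e4 : ∀ X, repF ['&'] "et".toList ("madame".toList ++ X)
        = "madame".toList ++ repF ['&'] "et".toList X := by
      intro X
      apply repF_append_no_match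
      intro i hi; simp at hi; interval_cases i <;> simp [List.isPrefixOf]
    show pipe (['m','r','s','.'] ++ b) = pvScanB ('m' :: 'r' :: 's' :: '.' :: b)
    rw [pvScanB, if_pos h1]
    unfold pipe
    rw [e1, e2, repF_append_match 'm' ['r','s','.'], e4]
    have ih' : pipe b = pvScanB b := by simpa using ih
    unfold pipe at ih'
    simpa using ih' 
  | case3 c t h1 h2 ih =>
    obtain ⟨b, hb⟩ := List.isPrefixOf_iff_prefix.mp h2
    obtain ⟨rfl, rfl⟩ : c = 'm' ∧ t = 'r' :: '.' :: b := by
      have := hb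
      simp at this
      exact ⟨this.1.symm, this.2.symm⟩
    have e1 : repF ['d','r','.'] "docteur".toList (['m','r','.'] ++ b)
        = ['m','r','.'] ++ repF ['d','r','.'] "docteur".toList b := by
      apply repF_append_no_match
      intro i hi; simp at hi; interval_cases i <;> simp [List.isPrefixOf]
    have e3 : ∀ X, repF ['m','r','s','.'] "madame".toList ("monsieur".toList ++ X)
        = "monsieur".toList ++ repF ['m','r','s','.'] "madame".toList X := by
      intro X
      apply repF_append_no_match
      intro i hi; simp at hi; interval_cases i <;> simp [List.isPrefixOf]
    have e4 : ∀ X, repF ['&'] "et".toList ("monsieur".toList ++ X)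
        = "monsieur".toList ++ repF ['&'] "et".toList X := by
      intro X
      apply repF_append_no_match
      intro i hi; simp at hi; interval_cases i <;> simp [List.isPrefixOf]
    show pipe (['m','r','.'] ++ b) = pvScanB ('m' :: 'r' :: '.' :: b)
    rw [pvScanB, if_neg h1, if_pos h2]
    unfold pipe
    rw [e1, repF_append_match 'm' ['r','.'], e3, e4]
    have ih' : pipe b = pvScanB b := by simpa using ih
    unfold pipe at ih'
    simpa using ih' 
  | case4 c t h1 h2 h3 ih =>
    obtain ⟨b, hb⟩ := List.isPrefixOf_iff_prefix.mp h3
    obtain ⟨rfl, rfl⟩ : c = 'd' ∧ t = 'r' :: '.' :: b := by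
      have := hb
      simp at this
      exact ⟨this.1.symm, this.2.symm⟩
    have e2 : ∀ X, repF ['m','r','.'] "monsieur".toList ("docteur".toList ++ X)
        = "docteur".toList ++ repF ['m','r','.'] "monsieur".toList X := by
      intro X
      apply repF_append_no_match
      intro i hi; simp at hi; interval_cases i <;> simp [List.isPrefixOf]
    have e3 : ∀ X, repF ['m','r','s','.'] "madame".toList ("docteur".toList ++ X)
        = "docteur".toList ++ repF ['m','r','s','.'] "madame".toList X := by
      intro X
      apply repF_append_no_match
      intro i hi; simp at hi; interval_cases i <;> simp [List.isPrefixOf]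
    have e4 : ∀ X, repF ['&'] "et".toList ("docteur".toList ++ X)
        = "docteur".toList ++ repF ['&'] "et".toList X := by
      intro X
      apply repF_append_no_match
      intro i hi; simp at hi; interval_cases i <;> simp [List.isPrefixOf]
    show pipe (['d','r','.'] ++ b) = pvScanB ('d' :: 'r' :: '.' :: b)
    rw [pvScanB, if_neg h1, if_neg h2, if_pos h3]
    unfold pipe
    rw [repF_append_match 'd' ['r','.'], e2, e3, e4]
    have ih' : pipe b = pvScanB b := by simpa using ih
    unfold pipe at ih'
    simpa using ih' 
  | case5 t h1 h2 h3 ih =>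
    have e1 : repF ['d','r','.'] "docteur".toList (['&'] ++ t)
        = ['&'] ++ repF ['d','r','.'] "docteur".toList t := by
      apply repF_append_no_match
      intro i hi; simp at hi; subst hi; simp [List.isPrefixOf]
    have e2 : ∀ X, repF ['m','r','.'] "monsieur".toList (['&'] ++ X)
        = ['&'] ++ repF ['m','r','.'] "monsieur".toList X := by
      intro X
      apply repF_append_no_match
      intro i hi; simp at hi; subst hi; simp [List.isPrefixOf]
    have e3 : ∀ X, repF ['m','r','s','.'] "madame".toList (['&'] ++ X)
        = ['&'] ++ repF ['m','r','s','.'] "madame".toList X := by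
      intro X
      apply repF_append_no_match
      intro i hi; simp at hi; subst hi; simp [List.isPrefixOf]
    show pipe (['&'] ++ t) = pvScanB ('&' :: t)
    rw [pvScanB, if_neg h1, if_neg h2, if_neg h3, if_pos rfl]
    unfold pipe
    rw [e1, e2, e3, repF_append_match '&' []]
    unfold pipe at ih
    simpa using ih
  | case6 c t h1 h2 h3 h4 ih =>
    have hdoc : "docteur".toList = 'd' :: "octeur".toList := by simp
    have hmon : "monsieur".toList = 'm' :: "onsieur".toList := by simp
    -- step 1: dr.-pass copies c
    have s1 : repF ['d','r','.'] "docteur".toList (c :: t)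
        = c :: repF ['d','r','.'] "docteur".toList t := by
      rw [repF, if_neg h3]
    set X1 := repF ['d','r','.'] "docteur".toList t with hX1
    -- step 2: mr.-pass copies c
    have hmr : ¬ ['m','r','.'].isPrefixOf (c :: X1) = true := by
      intro hcon
      obtain ⟨u, hu⟩ := List.isPrefixOf_iff_prefix.mp hcon
      simp at hu
      have hrt : ['r','.'].isPrefixOf X1 = true :=
        List.isPrefixOf_iff_prefix.mpr ⟨u, by simp [hu.2]⟩
      rw [hX1, hdoc,
        prefix_transfer 'd' ['r','.'] "octeur".toList ['r','.'] (by simp) t] at hrt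
      obtain ⟨v, hv⟩ := List.isPrefixOf_iff_prefix.mp hrt
      exact h2 (List.isPrefixOf_iff_prefix.mpr ⟨v, by rw [← hu.1, ← hv]; simp⟩)
    have s2 : repF ['m','r','.'] "monsieur".toList (c :: X1)
        = c :: repF ['m','r','.'] "monsieur".toList X1 := by
      rw [repF, if_neg hmr]
    set X2 := repF ['m','r','.'] "monsieur".toList X1 with hX2
    -- step 3: mrs.-pass copies c
    have hmrs : ¬ ['m','r','s','.'].isPrefixOf (c :: X2) = true := by
      intro hcon
      obtain ⟨u, hu⟩ := List.isPrefixOf_iff_prefix.mp hcon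
      simp at hu
      have hrt : ['r','s','.'].isPrefixOf X2 = true :=
        List.isPrefixOf_iff_prefix.mpr ⟨u, by simp [hu.2]⟩
      rw [hX2, hmon,
        prefix_transfer 'm' ['r','.'] "onsieur".toList ['r','s','.'] (by simp) X1] at hrt
      rw [hX1, hdoc,
        prefix_transfer 'd' ['r','.'] "octeur".toList ['r','s','.'] (by simp) t] at hrt
      obtain ⟨v, hv⟩ := List.isPrefixOf_iff_prefix.mp hrt
      exact h1 (List.isPrefixOf_iff_prefix.mpr ⟨v, by rw [← hu.1, ← hv]; simp⟩)
    have s3 : repF ['m','r','s','.'] "madame".toList (c :: X2)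
        = c :: repF ['m','r','s','.'] "madame".toList X2 := by
      rw [repF, if_neg hmrs]
    set X3 := repF ['m','r','s','.'] "madame".toList X2 with hX3
    -- step 4: &-pass copies c
    have s4 : repF ['&'] "et".toList (c :: X3)
        = c :: repF ['&'] "et".toList X3 := by
      have hnc : ¬ ['&'].isPrefixOf (c :: X3) = true := by
        simp [List.isPrefixOf]
        intro hcon
        exact h4 hcon.symm
      rw [repF, if_neg hnc]
    show pipe (c :: t) = pvScanB (c :: t)
    rw [pvScanB, if_neg h1, if_neg h2, if_neg h3, if_neg h4]
    unfold pipe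
    rw [s1, s2, s3, s4]
    unfold pipe at ih
    rw [hX3, hX2, hX1, ih]

theorem toList_A_eq_pipe (text : String) :
    (replace_abbreviations_py text).toList = pipe text.toList := by
  unfold replace_abbreviations_py pipe
  rw [PySem.Str.toList_replace, PySem.Str.toList_replace, PySem.Str.toList_replace,
    PySem.Str.toList_replace]
  rw [replace_eq_repF _ _ _ (by decide), replace_eq_repF _ _ _ (by decide),
    replace_eq_repF _ _ _ (by decide), replace_eq_repF _ _ _ (by decide)]
  have h1 : "dr.".toList = ['d','r','.'] := by decide
  have h2 : "mr.".toList = ['m','r','.'] := by decide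
  have h3 : "mrs.".toList = ['m','r','s','.'] := by decide
  have h4 : "&".toList = ['&'] := by decide
  rw [h1, h2, h3, h4]

theorem replace_abbreviations_py_spec : Claim_equal_replace_abbreviations_py := by
  intro text _
  unfold Spec_replace_abbreviations_py replace_abbreviations_py_alt
  calc replace_abbreviations_py text
      = String.ofList (replace_abbreviations_py text).toList := (String.ofList_toList).symm
    _ = String.ofList (pvScanB text.toList) := by rw [toList_A_eq_pipe, pipe_eq_scan]
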